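-- pv_equiv track=rewrite | github.com/NikitaCartes/Code-Battle-Tetris | CodeBattlePython/tetris_client/__main__.py | get_min_max_x
-- ===== SOURCE A (Python) =====
-- def get_min_max_x(figure_coors: list, current_board: list):
--     collision = False
--     collision_points = []
--     new_board = current_board.copy()
--     for pnt in figure_coors:
--         if (pnt[0]+1, pnt[1]) in figure_coors:
--             continue
--         else:
--             collision_points.append((pnt[0], pnt[1]))
--     delta = 1
--     lowest_point = max(figure_coors, key=lambda t: t[0])[0]
--     while collision == False:
--         shifted_points = [(pnt[0]+delta, pnt[1]) for pnt in collision_points]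
--         for pnt in shifted_points:
--             if (pnt[0], pnt[1]) in current_board:
--                 collision = True
--                 for pnt_temp in figure_coors:
--                     new_board.append( (pnt_temp[0]+delta-1, pnt_temp[1]))
--         delta += 1
--         if lowest_point + delta > 17:
--             for pnt_temp in figure_coors:
--                 new_board.append( (pnt_temp[0]+delta-1, pnt_temp[1]))
--             break
--     max_delta = delta
--
--     collision = False
--     collision_points = []
--     new_board = current_board.copy()
--     for pnt in figure_coors:
--         if (pnt[0]-1, pnt[1]) in figure_coors:
--             continue
--         else:
--             collision_points.append((pnt[0], pnt[1]))
--     delta = 1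
--     lowest_point = min(figure_coors, key=lambda t: t[0])[0]
--     while collision == False:
--         shifted_points = [(pnt[0]-delta, pnt[1]) for pnt in collision_points]
--         for pnt in shifted_points:
--             if (pnt[0], pnt[1]) in current_board:
--                 collision = True
--                 for pnt_temp in figure_coors:
--                     new_board.append( (pnt_temp[0]-delta+1, pnt_temp[1]))
--         delta += 1
--         if lowest_point - delta < 1:
--             for pnt_temp in figure_coors:
--                 new_board.append( (pnt_temp[0]-delta+1, pnt_temp[1]))
--             break
--     min_delta = -delta
--
--     return min_delta, max_delta
-- ===== SOURCE B (Python) =====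
-- def get_min_max_x(figure_coors: list, current_board: list):
--     # Closed-form: instead of shifting the figure step by step, take the minimum
--     # positive per-column gap between figure boundary cells and board cells.
--     fig = set(figure_coors)
--     board = set(current_board)
--     xs = [p[0] for p in figure_coors]
--     lowest = max(xs)
--     highest = min(xs)
--
--     def first_hit(pts, sign):
--         best = None
--         for (x, y) in pts:
--             for (bx, by) in board:
--                 if by == y:
--                     d = (bx - x) * sign
--                     if d > 0 and (best is None or d < best):
--                         best = d
--         return best
--
--     down_pts = [p for p in figure_coors if (p[0] + 1, p[1]) not in fig]
--     up_pts = [p for p in figure_coors if (p[0] - 1, p[1]) not in fig]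
--
--     bound_down = max(1, 17 - lowest)
--     d_down = first_hit(down_pts, 1)
--     max_delta = (bound_down if d_down is None else min(d_down, bound_down)) + 1
--
--     bound_up = max(1, highest - 1)
--     d_up = first_hit(up_pts, -1)
--     min_delta = -((bound_up if d_up is None else min(d_up, bound_up)) + 1)
--
--     return min_delta, max_delta
-- ===== Notes on version B (the rewrite author's own statement) =====
-- stated objective: faster
-- what changed: Replaces A's delta-by-delta shifting loops (re-testing every collision point against the whole board at each shift) by a single direct minimum over per-column gaps between figure boundary cells and board cells, capped by the break bound; the dead new_board bookkeeping is dropped and membership tests use sets.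
import Mathlib
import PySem

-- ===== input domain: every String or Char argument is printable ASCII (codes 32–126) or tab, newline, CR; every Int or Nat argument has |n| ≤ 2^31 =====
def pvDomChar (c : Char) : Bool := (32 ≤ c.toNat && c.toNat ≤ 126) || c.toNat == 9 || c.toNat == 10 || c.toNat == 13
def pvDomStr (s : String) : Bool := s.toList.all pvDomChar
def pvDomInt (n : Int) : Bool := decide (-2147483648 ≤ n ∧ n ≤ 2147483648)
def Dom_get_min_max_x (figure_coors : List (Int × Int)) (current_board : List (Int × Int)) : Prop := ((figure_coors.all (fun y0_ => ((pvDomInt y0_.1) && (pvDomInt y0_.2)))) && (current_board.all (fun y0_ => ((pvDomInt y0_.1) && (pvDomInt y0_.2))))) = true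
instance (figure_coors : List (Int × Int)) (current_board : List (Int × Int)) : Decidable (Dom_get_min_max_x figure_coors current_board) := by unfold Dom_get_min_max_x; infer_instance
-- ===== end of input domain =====

-- B replaces A's step-by-step shifting loops by a direct minimum over per-column gaps
-- between figure boundary cells and board cells (objective: faster).
-- A's 'new_board' is write-only and never returned; it is omitted from the port.

-- ===== PORT A =====
-- Both of A's while-loops have the same shape; ported once, parametrised by the shift
-- sign s (+1 for the down loop, -1 for the up loop) and the break bound (down:
-- 'lowest + delta > 17' is s*lowest + delta > 17; up: 'lowest - delta < 1' is
-- s*lowest + delta > -1).  Each loop iteration checks the shifted collision points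
-- against the board, then increments delta, then tests the break bound.
def pvLoopA (collision_points : List (Int × Int)) (current_board : List (Int × Int))
    (s bound lowest delta : Int) : Int :=
  if collision_points.any (fun p => current_board.contains (p.1 + s * delta, p.2)) then
    delta + 1
  else if bound < s * lowest + (delta + 1) then
    delta + 1
  else
    pvLoopA collision_points current_board s bound lowest (delta + 1)
termination_by (bound - s * lowest - delta).toNat
decreasing_by omega

def get_min_max_x (figure_coors : List (Int × Int)) (current_board : List (Int × Int)) : Int × Int :=
  let collision_points₁ := figure_coors.foldl
    (fun acc p => if figure_coors.contains (p.1 + 1, p.2) then acc else acc ++ [(p.1, p.2)]) []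
  let lowest₁ := match PySem.List.max? figure_coors (fun t => t.1) with
    | some t => t.1
    | none => 0   -- unreachable under Pre_ (Python's max raises on an empty figure)
  let max_delta := pvLoopA collision_points₁ current_board 1 17 lowest₁ 1
  let collision_points₂ := figure_coors.foldl
    (fun acc p => if figure_coors.contains (p.1 - 1, p.2) then acc else acc ++ [(p.1, p.2)]) []
  let lowest₂ := match PySem.List.min? figure_coors (fun t => t.1) with
    | some t => t.1
    | none => 0   -- unreachable under Pre_
  let min_delta := -(pvLoopA collision_points₂ current_board (-1) (-1) lowest₂ 1)
  (min_delta, max_delta)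

-- ===== PORT B =====
-- first_hit of Source B: minimum positive per-column gap (bx - x) * sign over all
-- boundary points and board cells (a PySem.Set, i.e. the distinct board cells).
def pvFirstHit (board : PySem.Set (Int × Int)) (pts : List (Int × Int)) (s : Int) : Option Int :=
  pts.foldl (fun best p =>
    board.foldl (fun best c =>
      if c.2 = p.2 then
        let d := (c.1 - p.1) * s
        if 0 < d then
          match best with
          | none => some d
          | some b => if d < b then some d else best
        else best
      else best) best) none

def get_min_max_x_alt (figure_coors : List (Int × Int)) (current_board : List (Int × Int)) : Int × Int :=
  let fig := PySem.Set.ofList figure_coors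
  let board := PySem.Set.ofList current_board
  let xs := figure_coors.map (fun p => p.1)
  let lowest := match PySem.List.max? xs (fun x => x) with
    | some v => v
    | none => 0   -- unreachable under Pre_ (max of an empty list raises)
  let highest := match PySem.List.min? xs (fun x => x) with
    | some v => v
    | none => 0   -- unreachable under Pre_
  let down_pts := figure_coors.filter (fun p => !(PySem.Set.contains fig (p.1 + 1, p.2)))
  let up_pts := figure_coors.filter (fun p => !(PySem.Set.contains fig (p.1 - 1, p.2)))
  let bound_down := max 1 (17 - lowest)
  let max_delta := (match pvFirstHit board down_pts 1 with
    | some d => min d bound_down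
    | none => bound_down) + 1
  let bound_up := max 1 (highest - 1)
  let min_delta := -((match pvFirstHit board up_pts (-1) with
    | some d => min d bound_up
    | none => bound_up) + 1)
  (min_delta, max_delta)

-- ===== PRECONDITION & SPEC =====
-- Python A raises ValueError (max of an empty sequence) when figure_coors is empty;
-- those inputs are excluded (B raises there too).
def Pre_get_min_max_x (figure_coors : List (Int × Int)) (current_board : List (Int × Int)) : Prop :=
  figure_coors ≠ []
instance (figure_coors : List (Int × Int)) (current_board : List (Int × Int)) : Decidable (Pre_get_min_max_x figure_coors current_board) := by unfold Pre_get_min_max_x; infer_instance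
def pvWitness_get_min_max_x : (List (Int × Int)) × (List (Int × Int)) := ([(3, 4), (4, 4)], [(10, 4), (10, 5)])
def Spec_get_min_max_x (figure_coors : List (Int × Int)) (current_board : List (Int × Int)) (out : Int × Int) : Prop := out = get_min_max_x_alt figure_coors current_board
instance (figure_coors : List (Int × Int)) (current_board : List (Int × Int)) (out : Int × Int) : Decidable (Spec_get_min_max_x figure_coors current_board out) := by unfold Spec_get_min_max_x; infer_instance

-- ===== CLAIM (what is proved, stated in full; the proofs are below) =====
def Claim_equal_get_min_max_x : Prop := ∀ (figure_coors : List (Int × Int)) (current_board : List (Int × Int)), Dom_get_min_max_x figure_coors current_board → Pre_get_min_max_x figure_coors current_board → Spec_get_min_max_x figure_coors current_board (get_min_max_x figure_coors current_board)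

-- ===== LEMMAS AND PROOFS =====

-- A nested for-loop over pts and board is a single fold over the pair list.
theorem pv_foldl_foldl {α β δ : Type} (pts : List α) (board : List β)
    (g : α → δ → β → δ) (init : δ) :
    pts.foldl (fun b p => board.foldl (g p) b) init
      = (pts.flatMap (fun p => board.map (fun c => (p, c)))).foldl (fun b pc => g pc.1 b pc.2) init := by
  induction pts generalizing init with
  | nil => rfl
  | cons p t ih => simp [List.foldl_append, List.foldl_map, ih]

-- the candidate gaps Source B's first_hit minimises over
def pvCands (board : List (Int × Int)) (pts : List (Int × Int)) (s : Int) : List Int :=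
  ((pts.flatMap (fun p => board.map (fun c => (p, c)))).filter
      (fun pc => decide (pc.2.2 = pc.1.2 ∧ 0 < (pc.2.1 - pc.1.1) * s))).map
    (fun pc => (pc.2.1 - pc.1.1) * s)

-- running strict-min step of first_hit once the validity test is factored out
def pvStepMin (b : Option Int) (d : Int) : Option Int :=
  match b with
  | none => some d
  | some v => if d < v then some d else some v

theorem pvStepMin_foldl_some (ds : List Int) (b : Int) :
    ds.foldl pvStepMin (some b) = some (ds.foldl min b) := by
  induction ds generalizing b with
  | nil => rfl
  | cons d t ih =>
    have h1 : pvStepMin (some b) d = some (min b d) := by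
      simp only [pvStepMin]
      split_ifs <;> (congr 1; omega)
    simp only [List.foldl_cons, h1, ih]

theorem pvFirstHit_eq_min (board : PySem.Set (Int × Int)) (pts : List (Int × Int)) (s : Int) :
    pvFirstHit board pts s
      = match pvCands board pts s with
        | [] => none
        | d :: t => some (t.foldl min d) := by
  have h0 : pvFirstHit board pts s
      = (pts.flatMap (fun p => board.map (fun c => (p, c)))).foldl
          (fun b pc =>
            if pc.2.2 = pc.1.2 then
              let d := (pc.2.1 - pc.1.1) * s
              if 0 < d then
                match b with
                | none => some d
                | some v => if d < v then some d else b
              else b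
            else b) none := by
    unfold pvFirstHit
    exact pv_foldl_foldl pts board _ none
  have h1 : (pts.flatMap (fun p => board.map (fun c => (p, c)))).foldl
          (fun b pc =>
            if pc.2.2 = pc.1.2 then
              let d := (pc.2.1 - pc.1.1) * s
              if 0 < d then
                match b with
                | none => some d
                | some v => if d < v then some d else b
              else b
            else b) none
      = (pts.flatMap (fun p => board.map (fun c => (p, c)))).foldl
          (fun b pc => if pc.2.2 = pc.1.2 ∧ 0 < (pc.2.1 - pc.1.1) * s
            then pvStepMin b ((pc.2.1 - pc.1.1) * s) else b) none := by
    apply PySem.List.foldl_congr_mem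
    intro acc x _
    by_cases hcol : x.2.2 = x.1.2
    · by_cases hpos : 0 < (x.2.1 - x.1.1) * s
      · simp only [if_pos hcol, if_pos hpos, if_pos (And.intro hcol hpos), pvStepMin]
        cases acc with
        | none => rfl
        | some v => rfl
      · have hn : ¬(x.2.2 = x.1.2 ∧ 0 < (x.2.1 - x.1.1) * s) := by tauto
        simp only [if_pos hcol, if_neg hpos, if_neg hn]
    · have hn : ¬(x.2.2 = x.1.2 ∧ 0 < (x.2.1 - x.1.1) * s) := by tauto
      simp only [if_neg hcol, if_neg hn]
  have h2 := PySem.List.foldl_ite_eq_foldl_filter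
      (p := fun pc : (Int × Int) × (Int × Int) => pc.2.2 = pc.1.2 ∧ 0 < (pc.2.1 - pc.1.1) * s)
      (f := fun b pc => pvStepMin b ((pc.2.1 - pc.1.1) * s))
      (pts.flatMap (fun p => board.map (fun c => (p, c)))) none
  have h3 := (List.foldl_map (f := fun pc : (Int × Int) × (Int × Int) => (pc.2.1 - pc.1.1) * s)
      (g := pvStepMin)
      (l := (pts.flatMap (fun p => board.map (fun c => (p, c)))).filter
        (fun pc => decide (pc.2.2 = pc.1.2 ∧ 0 < (pc.2.1 - pc.1.1) * s)))
      (init := none)).symm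
  rw [h0, h1, h2]
  rw [show (fun (b : Option Int) (pc : (Int × Int) × (Int × Int)) =>
        pvStepMin b ((pc.2.1 - pc.1.1) * s))
      = (fun b pc => pvStepMin b ((fun pc : (Int × Int) × (Int × Int) => (pc.2.1 - pc.1.1) * s) pc))
      from rfl] at h3 ⊢
  rw [h3]
  show (pvCands board pts s).foldl pvStepMin none = _
  cases hc : pvCands board pts s with
  | nil => rfl
  | cons d t =>
    simp only [List.foldl_cons]
    rw [show pvStepMin none d = some d from rfl, pvStepMin_foldl_some]

theorem pv_mem_cands (board pts : List (Int × Int)) (s d : Int) :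
    d ∈ pvCands board pts s ↔ ∃ p ∈ pts, ∃ c ∈ board, c.2 = p.2 ∧ (c.1 - p.1) * s = d ∧ 0 < d := by
  simp only [pvCands, List.mem_map, List.mem_filter, List.mem_flatMap, decide_eq_true_eq]
  constructor
  · rintro ⟨pc, ⟨⟨p, hp, c, hc, rfl⟩, h2, h3⟩, rfl⟩
    exact ⟨p, hp, c, hc, h2, rfl, h3⟩
  · rintro ⟨p, hp, c, hc, h2, rfl, h3⟩
    exact ⟨(p, c), ⟨⟨p, hp, c, hc, rfl⟩, h2, h3⟩, rfl⟩

-- candidate membership ↔ the collision test A runs at shift d (s = ±1)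
theorem pv_cands_iff_hit (cb pts : List (Int × Int)) (s d : Int)
    (hs : s = 1 ∨ s = -1) (hd : 0 < d) :
    d ∈ pvCands (PySem.Set.ofList cb) pts s
      ↔ pts.any (fun p => cb.contains (p.1 + s * d, p.2)) = true := by
  rw [pv_mem_cands, List.any_eq_true]
  constructor
  · rintro ⟨p, hp, c, hc, hcol, hdiff, -⟩
    refine ⟨p, hp, List.contains_iff_mem.mpr ?_⟩
    have hc' := (PySem.Set.mem_ofList cb c).mp hc
    have : c = (p.1 + s * d, p.2) := by
      have h1 : c.1 = p.1 + s * d := by rcases hs with rfl | rfl <;> omega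
      exact Prod.ext h1 hcol
    rwa [this] at hc'
  · rintro ⟨p, hp, hmem⟩
    have hmem' := List.contains_iff_mem.mp hmem
    refine ⟨p, hp, (p.1 + s * d, p.2), (PySem.Set.mem_ofList cb _).mpr hmem', rfl, ?_, hd⟩
    rcases hs with rfl | rfl <;> ring

-- A's while-loop invariant: started at any delta with no hit below delta,
-- it returns min(first colliding shift, break bound) + 1
theorem pvLoopA_aux (pts cb : List (Int × Int)) (s bound lowest : Int) (mOpt : Option Int)
    (h1 : ∀ m, mOpt = some m → 0 < m ∧ pts.any (fun p => cb.contains (p.1 + s * m, p.2)) = true ∧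
            ∀ d, 0 < d → pts.any (fun p => cb.contains (p.1 + s * d, p.2)) = true → m ≤ d)
    (h2 : mOpt = none → ∀ d, 0 < d → pts.any (fun p => cb.contains (p.1 + s * d, p.2)) = false) :
    ∀ (n : Nat) (delta : Int), (max 1 (bound - s * lowest) - delta).toNat = n →
      0 < delta → delta ≤ max 1 (bound - s * lowest) →
      (∀ d, 0 < d → d < delta → pts.any (fun p => cb.contains (p.1 + s * d, p.2)) = false) →
      pvLoopA pts cb s bound lowest delta
        = (match mOpt with
           | some m => min m (max 1 (bound - s * lowest))
           | none => max 1 (bound - s * lowest)) + 1 := by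
  intro n
  induction n with
  | zero =>
    intro delta hn hd0 hdD hmiss
    have hdeq : delta = max 1 (bound - s * lowest) := by omega
    rw [pvLoopA]
    by_cases hhit : pts.any (fun p => cb.contains (p.1 + s * delta, p.2)) = true
    · rw [if_pos hhit]
      cases hmo : mOpt with
      | none => rw [h2 hmo delta hd0] at hhit; exact absurd hhit (by simp)
      | some m =>
        obtain ⟨hm0, hmhit, hmin⟩ := h1 m hmo
        have hle : m ≤ delta := hmin delta hd0 hhit
        have hge : ¬ m < delta := fun hlt => by
          rw [hmiss m hm0 hlt] at hmhit; exact absurd hmhit (by simp)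
        have : m = delta := by omega
        simp only []
        omega
    · rw [if_neg hhit]
      have hbr : bound < s * lowest + (delta + 1) := by omega
      rw [if_pos hbr]
      cases hmo : mOpt with
      | none => simp only []; omega
      | some m =>
        obtain ⟨hm0, hmhit, _⟩ := h1 m hmo
        have hgt : delta < m := by
          rcases lt_trichotomy m delta with h | h | h
          · rw [hmiss m hm0 h] at hmhit; exact absurd hmhit (by simp)
          · rw [h] at hmhit; exact absurd hmhit hhit
          · exact h
        simp only []
        omega
  | succ n ih =>
    intro delta hn hd0 hdD hmiss
    have hlt : delta < max 1 (bound - s * lowest) := by omega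
    rw [pvLoopA]
    by_cases hhit : pts.any (fun p => cb.contains (p.1 + s * delta, p.2)) = true
    · rw [if_pos hhit]
      cases hmo : mOpt with
      | none => rw [h2 hmo delta hd0] at hhit; exact absurd hhit (by simp)
      | some m =>
        obtain ⟨hm0, hmhit, hmin⟩ := h1 m hmo
        have hle : m ≤ delta := hmin delta hd0 hhit
        have hge : ¬ m < delta := fun hl => by
          rw [hmiss m hm0 hl] at hmhit; exact absurd hmhit (by simp)
        have : m = delta := by omega
        simp only []
        omega
    · rw [if_neg hhit]
      have hnbr : ¬ bound < s * lowest + (delta + 1) := by omega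
      rw [if_neg hnbr]
      apply ih (delta + 1) (by omega) (by omega) (by omega)
      intro d hd0' hdlt
      rcases lt_or_eq_of_le (by omega : d ≤ delta) with h | h
      · exact hmiss d hd0' h
      · rw [h]; exact Bool.eq_false_iff.mpr hhit

-- A's while-loop, started at delta = 1, returns min(first colliding shift, break bound) + 1
theorem pvLoopA_char (pts cb : List (Int × Int)) (s bound lowest : Int) (mOpt : Option Int)
    (h1 : ∀ m, mOpt = some m → 0 < m ∧ pts.any (fun p => cb.contains (p.1 + s * m, p.2)) = true ∧
            ∀ d, 0 < d → pts.any (fun p => cb.contains (p.1 + s * d, p.2)) = true → m ≤ d)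
    (h2 : mOpt = none → ∀ d, 0 < d → pts.any (fun p => cb.contains (p.1 + s * d, p.2)) = false) :
    pvLoopA pts cb s bound lowest 1
      = (match mOpt with
         | some m => min m (max 1 (bound - s * lowest))
         | none => max 1 (bound - s * lowest)) + 1 := by
  exact pvLoopA_aux pts cb s bound lowest mOpt h1 h2
    (max 1 (bound - s * lowest) - 1).toNat 1 rfl (by omega) (by omega) (by omega)

-- A's collision_points loop builds exactly B's boundary filter
theorem pv_cps_eq_down (figure_coors : List (Int × Int)) :
    figure_coors.foldl
        (fun acc p => if figure_coors.contains (p.1 + 1, p.2) then acc else acc ++ [(p.1, p.2)]) []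
      = figure_coors.filter (fun p => !(PySem.Set.contains (PySem.Set.ofList figure_coors) (p.1 + 1, p.2))) := by
  rw [PySem.List.foldl_congr_mem _ _
      (fun acc p => if (!(PySem.Set.contains (PySem.Set.ofList figure_coors) (p.1 + 1, p.2))) = true
        then acc ++ [(p.1, p.2)] else acc) _ ?_]
  · rw [PySem.List.foldl_append_if_eq_filter]
    simp
  · intro acc x hx
    have hco : PySem.Set.contains (PySem.Set.ofList figure_coors) (x.1 + 1, x.2)
        = figure_coors.contains (x.1 + 1, x.2) := by
      rw [Bool.eq_iff_iff]
      simp only [PySem.Set.contains]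
      rw [List.contains_iff_mem, List.contains_iff_mem]
      exact PySem.Set.mem_ofList figure_coors _
    simp only []
    rw [hco]
    cases h : figure_coors.contains (x.1 + 1, x.2) <;> simp


-- A's collision_points loop builds exactly B's boundary filter
theorem pv_cps_eq_up (figure_coors : List (Int × Int)) :
    figure_coors.foldl
        (fun acc p => if figure_coors.contains (p.1 - 1, p.2) then acc else acc ++ [(p.1, p.2)]) []
      = figure_coors.filter (fun p => !(PySem.Set.contains (PySem.Set.ofList figure_coors) (p.1 - 1, p.2))) := by
  rw [PySem.List.foldl_congr_mem _ _
      (fun acc p => if (!(PySem.Set.contains (PySem.Set.ofList figure_coors) (p.1 - 1, p.2))) = true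
        then acc ++ [(p.1, p.2)] else acc) _ ?_]
  · rw [PySem.List.foldl_append_if_eq_filter]
    simp
  · intro acc x hx
    have hco : PySem.Set.contains (PySem.Set.ofList figure_coors) (x.1 - 1, x.2)
        = figure_coors.contains (x.1 - 1, x.2) := by
      rw [Bool.eq_iff_iff]
      simp only [PySem.Set.contains]
      rw [List.contains_iff_mem, List.contains_iff_mem]
      exact PySem.Set.mem_ofList figure_coors _
    simp only []
    rw [hco]
    cases h : figure_coors.contains (x.1 - 1, x.2) <;> simp


theorem pv_max_key_eq (l : List (Int × Int)) (t : Int × Int) (v : Int)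
    (h1 : PySem.List.max? l (fun t => t.1) = some t)
    (h2 : PySem.List.max? (l.map (fun p => p.1)) (fun x => x) = some v) : t.1 = v := by
  have hv := PySem.List.max?_mem h2
  obtain ⟨y, hy, rfl⟩ := List.mem_map.mp hv
  apply le_antisymm
  · exact PySem.List.max?_isMax h2 t.1 (List.mem_map.mpr ⟨t, PySem.List.max?_mem h1, rfl⟩)
  · exact PySem.List.max?_isMax h1 y hy

theorem pv_min_key_eq (l : List (Int × Int)) (t : Int × Int) (v : Int)
    (h1 : PySem.List.min? l (fun t => t.1) = some t)
    (h2 : PySem.List.min? (l.map (fun p => p.1)) (fun x => x) = some v) : t.1 = v := by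
  have hv := PySem.List.min?_mem h2
  obtain ⟨y, hy, rfl⟩ := List.mem_map.mp hv
  apply le_antisymm
  · exact PySem.List.min?_isMin h1 y hy
  · exact PySem.List.min?_isMin h2 t.1 (List.mem_map.mpr ⟨t, PySem.List.min?_mem h1, rfl⟩)

-- package h1/h2 of pvLoopA_char for mOpt = pvFirstHit
theorem pv_firstHit_h1 (cb pts : List (Int × Int)) (s : Int) (hs : s = 1 ∨ s = -1) :
    (∀ m, pvFirstHit (PySem.Set.ofList cb) pts s = some m →
        0 < m ∧ pts.any (fun p => cb.contains (p.1 + s * m, p.2)) = true ∧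
          ∀ d, 0 < d → pts.any (fun p => cb.contains (p.1 + s * d, p.2)) = true → m ≤ d) ∧
    (pvFirstHit (PySem.Set.ofList cb) pts s = none →
        ∀ d, 0 < d → pts.any (fun p => cb.contains (p.1 + s * d, p.2)) = false) := by
  have heq := pvFirstHit_eq_min (PySem.Set.ofList cb) pts s
  constructor
  · intro m hm
    rw [heq] at hm
    cases hc : pvCands (PySem.Set.ofList cb) pts s with
    | nil => rw [hc] at hm; exact absurd hm (by simp)
    | cons d t =>
      rw [hc] at hm
      have hmv : m = t.foldl min d := by
        simpa using hm.symm
      have hmem : m ∈ d :: t := by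
        rcases PySem.List.foldl_min_mem t d with h | h
        · rw [hmv, h]; exact List.mem_cons_self
        · rw [hmv]; exact List.mem_cons_of_mem _ h
      have hmc : m ∈ pvCands (PySem.Set.ofList cb) pts s := by rw [hc]; exact hmem
      obtain ⟨p, hp, c, hcb, hcol, hdiff, hm0⟩ := (pv_mem_cands _ _ _ _).mp hmc
      refine ⟨hm0, (pv_cands_iff_hit cb pts s m hs hm0).mp hmc, ?_⟩
      intro e he hhit
      have hec : e ∈ pvCands (PySem.Set.ofList cb) pts s :=
        (pv_cands_iff_hit cb pts s e hs he).mpr hhit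
      rw [hc] at hec
      rcases List.mem_cons.mp hec with rfl | hin
      · rw [hmv]; exact (PySem.List.foldl_min_le t e).1
      · rw [hmv]; exact (PySem.List.foldl_min_le t d).2 e hin
  · intro hn e he
    rw [heq] at hn
    cases hc : pvCands (PySem.Set.ofList cb) pts s with
    | cons d t => rw [hc] at hn; exact absurd hn (by simp)
    | nil =>
      cases hh : pts.any (fun p => cb.contains (p.1 + s * e, p.2)) with
      | false => rfl
      | true =>
        have : e ∈ pvCands (PySem.Set.ofList cb) pts s :=
          (pv_cands_iff_hit cb pts s e hs he).mpr hh
        rw [hc] at this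
        exact absurd this (by simp)

-- ===== VERDICT (by name: the statement is the Claim_ definition above) =====
theorem get_min_max_x_spec : Claim_equal_get_min_max_x := by
  intro fig cb _ hpre
  unfold Spec_get_min_max_x
  have hmap : fig.map (fun p => p.1) ≠ [] := by
    intro h; exact hpre (List.map_eq_nil_iff.mp h)
  obtain ⟨t, ht⟩ : ∃ t, PySem.List.max? fig (fun t => t.1) = some t := by
    cases h : PySem.List.max? fig (fun t => t.1) with
    | none => exact absurd ((PySem.List.max?_eq_none_iff _ _).mp h) hpre
    | some t => exact ⟨t, rfl⟩
  obtain ⟨t', ht'⟩ : ∃ t', PySem.List.min? fig (fun t => t.1) = some t' := by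
    cases h : PySem.List.min? fig (fun t => t.1) with
    | none => exact absurd ((PySem.List.min?_eq_none_iff _ _).mp h) hpre
    | some t' => exact ⟨t', rfl⟩
  obtain ⟨v, hv⟩ : ∃ v, PySem.List.max? (fig.map (fun p => p.1)) (fun x => x) = some v := by
    cases h : PySem.List.max? (fig.map (fun p => p.1)) (fun x => x) with
    | none => exact absurd ((PySem.List.max?_eq_none_iff _ _).mp h) hmap
    | some v => exact ⟨v, rfl⟩
  obtain ⟨v', hv'⟩ : ∃ v', PySem.List.min? (fig.map (fun p => p.1)) (fun x => x) = some v' := by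
    cases h : PySem.List.min? (fig.map (fun p => p.1)) (fun x => x) with
    | none => exact absurd ((PySem.List.min?_eq_none_iff _ _).mp h) hmap
    | some v' => exact ⟨v', rfl⟩
  have htv : t.1 = v := pv_max_key_eq fig t v ht hv
  have ht'v' : t'.1 = v' := pv_min_key_eq fig t' v' ht' hv'
  show get_min_max_x fig cb = get_min_max_x_alt fig cb
  simp only [get_min_max_x, get_min_max_x_alt, ht, ht', hv, hv', pv_cps_eq_down, pv_cps_eq_up]
  obtain ⟨hd1, hd2⟩ := pv_firstHit_h1 cb
    (fig.filter (fun p => !(PySem.Set.contains (PySem.Set.ofList fig) (p.1 + 1, p.2)))) 1 (Or.inl rfl)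
  obtain ⟨hu1, hu2⟩ := pv_firstHit_h1 cb
    (fig.filter (fun p => !(PySem.Set.contains (PySem.Set.ofList fig) (p.1 - 1, p.2)))) (-1) (Or.inr rfl)
  rw [pvLoopA_char _ cb 1 17 t.1 _ hd1 hd2, pvLoopA_char _ cb (-1) (-1) t'.1 _ hu1 hu2]
  rw [htv, ht'v']
  have hb1 : (17 : Int) - 1 * v = 17 - v := by ring
  have hb2 : (-1 : Int) - -1 * v' = v' - 1 := by ring
  rw [hb1, hb2]
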